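-- pv_equiv track=rewrite | github.com/moltasthornblom/AOC_helper | 2023solves/day7.py | is_nth_of_a_kind
-- ===== SOURCE A (Python) =====
-- def is_nth_of_a_kind(hand, nth, occ=1):
--     sp = [*hand]
--     times = []
--     for x in sp:
--         if x not in times and sp.count(x) == nth:
--             if len(times) == occ - 1:
--                 return True
--             else:
--                 times.append(x)
--     return False
-- ===== SOURCE B (Python) =====
-- def is_nth_of_a_kind(hand, nth, occ=1):
--     counts = {}
--     for x in hand:
--         counts[x] = counts.get(x, 0) + 1
--     qualifying = sum(1 for c in counts.values() if c == nth)
--     return occ >= 1 and qualifying >= occ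
-- ===== Notes on version B (the rewrite author's own statement) =====
-- stated objective: faster
-- what changed: Replaces the per-card sp.count scans and the distinct-tracking 'times' list with a frequency dict built in one pass, then counts values equal to nth and compares with occ (keeping the occ >= 1 guard A's behaviour implies).
import Mathlib
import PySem

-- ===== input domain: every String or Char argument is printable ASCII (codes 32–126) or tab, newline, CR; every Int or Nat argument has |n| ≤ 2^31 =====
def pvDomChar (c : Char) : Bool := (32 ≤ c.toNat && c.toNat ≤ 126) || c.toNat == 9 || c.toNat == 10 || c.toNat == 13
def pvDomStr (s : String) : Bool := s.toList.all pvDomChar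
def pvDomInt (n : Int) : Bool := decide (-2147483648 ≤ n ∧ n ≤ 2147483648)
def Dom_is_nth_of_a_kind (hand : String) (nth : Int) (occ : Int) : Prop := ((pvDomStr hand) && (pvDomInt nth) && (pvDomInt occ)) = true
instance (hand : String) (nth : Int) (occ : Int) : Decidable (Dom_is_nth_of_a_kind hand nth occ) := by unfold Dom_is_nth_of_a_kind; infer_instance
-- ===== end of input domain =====

-- B builds a frequency table in one pass and counts values equal to nth, replacing A's
-- per-card count scans and distinct-tracking list; same return value (occ >= 1 guard kept).

-- ===== PORT A =====
-- the 'for x in sp' loop with its early 'return True'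
def isNthLoopA (sp : List Char) (nth occ : Int) : List Char → List Char → Bool
  | [], _ => false
  | x :: rest, times =>
    if ¬ times.contains x ∧ ((PySem.List.count sp x : Int) = nth) then
      if (times.length : Int) = occ - 1 then true
      else isNthLoopA sp nth occ rest (times ++ [x])
    else isNthLoopA sp nth occ rest times

def is_nth_of_a_kind (hand : String) (nth : Int) (occ : Int) : Bool :=
  let sp := hand.toList
  isNthLoopA sp nth occ sp []

-- ===== PORT B =====
def is_nth_of_a_kind_alt (hand : String) (nth : Int) (occ : Int) : Bool :=
  let counts := hand.toList.foldl (fun d x => d.insert x (d.getD x 0 + 1)) (PySem.Dict.empty (κ := Char) (ν := Int))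
  let qualifying := List.countP (fun c => c == nth) counts.values
  decide (occ ≥ 1) && decide ((qualifying : Int) ≥ occ)

-- ===== PRECONDITION & SPEC =====
def Spec_is_nth_of_a_kind (hand : String) (nth : Int) (occ : Int) (out : Bool) : Prop := out = is_nth_of_a_kind_alt hand nth occ
instance (hand : String) (nth : Int) (occ : Int) (out : Bool) : Decidable (Spec_is_nth_of_a_kind hand nth occ out) := by unfold Spec_is_nth_of_a_kind; infer_instance

-- ===== CLAIM (what is proved, stated in full; the proofs are below) =====
def Claim_equal_is_nth_of_a_kind : Prop := ∀ (hand : String) (nth : Int) (occ : Int), Dom_is_nth_of_a_kind hand nth occ → Spec_is_nth_of_a_kind hand nth occ (is_nth_of_a_kind hand nth occ)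

-- ===== LEMMAS AND PROOFS =====

-- the set of qualifying cards in `rest` that are not yet in `times`
def pvQualSet (sp : List Char) (nth : Int) (rest times : List Char) : Finset Char :=
  (rest.toFinset \ times.toFinset).filter (fun x => (PySem.List.count sp x : Int) = nth)

lemma loopA_false_of_nonpos (sp : List Char) (nth occ : Int) (hocc : occ ≤ 0) :
    ∀ rest times, isNthLoopA sp nth occ rest times = false := by
  intro rest
  induction rest with
  | nil => intro times; rfl
  | cons x r ih =>
    intro times
    simp only [isNthLoopA]
    split_ifs with h1 h2
    · exfalso; omega
    · exact ih _
    · exact ih _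

lemma loopA_eq (sp : List Char) (nth occ : Int) (_hocc : 1 ≤ occ) :
    ∀ rest times, (times.length : Int) < occ →
      isNthLoopA sp nth occ rest times
        = decide (occ ≤ (times.length : Int) + ((pvQualSet sp nth rest times).card : Int)) := by
  intro rest
  induction rest with
  | nil =>
    intro times hlt
    simp [isNthLoopA, pvQualSet]
    omega
  | cons x r ih =>
    intro times hlt
    simp only [isNthLoopA]
    split_ifs with h1 h2
    · -- x qualifies and returns True: x is in the qual set, so card ≥ 1
      have hx : x ∈ pvQualSet sp nth (x :: r) times := by
        simp [pvQualSet]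
        exact ⟨by simpa using h1.1, h1.2⟩
      have hcard : 1 ≤ (pvQualSet sp nth (x :: r) times).card := Finset.card_pos.mpr ⟨x, hx⟩
      symm; simp; omega
    · -- x qualifies, appended to times
      have hlen : ((times ++ [x]).length : Int) < occ := by
        simp; omega
      rw [ih _ hlen]
      have hset : pvQualSet sp nth (x :: r) times
          = insert x (pvQualSet sp nth r (times ++ [x])) := by
        ext y
        by_cases hyx : y = x
        · subst hyx
          simp [pvQualSet]
          exact ⟨by simpa using h1.1, h1.2⟩
        · simp [pvQualSet, hyx]
      have hxnot : x ∉ pvQualSet sp nth r (times ++ [x]) := by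
        simp [pvQualSet]
      rw [hset, Finset.card_insert_of_notMem hxnot]
      simp
      constructor <;> intro <;> omega
    · -- x does not qualify (already in times or wrong count): set unchanged
      rw [ih _ hlt]
      have hset : pvQualSet sp nth (x :: r) times = pvQualSet sp nth r times := by
        ext y
        simp only [not_and, List.contains_eq_mem, Bool.not_eq_true, decide_eq_false_iff_not] at h1
        by_cases hyx : y = x
        · subst hyx
          simp [pvQualSet]
          tauto
        · simp [pvQualSet, hyx]
      rw [hset]

lemma alt_qual (sp : List Char) (nth : Int) :
    List.countP (fun c => c == nth)
      ((sp.foldl (fun d x => d.insert x (d.getD x 0 + 1)) (PySem.Dict.empty (κ := Char) (ν := Int))).values)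
      = (pvQualSet sp nth sp []).card := by
  rw [PySem.Dict.foldl_insert_getD_add_one_eq_counter]
  simp only [PySem.Dict.values, PySem.Dict.items_counter, List.map_map]
  rw [List.countP_map, List.countP_eq_length_filter]
  have hnd : ((PySem.Set.ofList sp).filter
      ((fun c => c == nth) ∘ (fun x => x.2) ∘ (fun k => (k, (sp.count k : Int))))).Nodup :=
    (PySem.Set.nodup_ofList sp).filter _
  rw [← List.toFinset_card_of_nodup hnd]
  congr 1
  ext y
  simp [pvQualSet, PySem.Set.mem_ofList]

-- ===== VERDICT (by name: the statement is the Claim_ definition above) =====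
theorem is_nth_of_a_kind_spec : Claim_equal_is_nth_of_a_kind := by
  intro hand nth occ _hdom
  unfold Spec_is_nth_of_a_kind
  simp only [is_nth_of_a_kind, is_nth_of_a_kind_alt]
  rw [alt_qual]
  by_cases hocc : 1 ≤ occ
  · rw [loopA_eq hand.toList nth occ hocc hand.toList [] (by simpa using hocc)]
    simp [hocc]
  · rw [loopA_false_of_nonpos hand.toList nth occ (by omega)]
    simp [hocc]
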